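-- pv_equiv track=rewrite | github.com/jaffa-ai/results-rag | utils.py | standardize_llm_response
-- ===== SOURCE A (Python) =====
-- def standardize_llm_response(response_text):
--     """Standardize field names in raw LLM JSON response"""
--     # Define standardized field mappings
--     field_mappings = {
--         '"segment_assets_unallocated"': '"unallocated_assets"',
--         '"segment_liabilities_unallocated"': '"unallocated_liabilities"',
--         '"finance_cost"': '"finance_costs"',
--         '"value_of_sales_&_services"': '"value_of_sales_services"',
--         '"segment_results_ebitda_': '"segment_ebitda_'
--     }
--
--     # Apply string replacements to standardize field names
--     standardized_text = response_text
--     for old_name, new_name in field_mappings.items():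
--         standardized_text = standardized_text.replace(old_name, new_name)
--
--     return standardized_text
-- ===== SOURCE B (Python) =====
-- def standardize_llm_response(response_text):
--     """Standardize field names in raw LLM JSON response."""
--     field_mappings = [
--         ('"segment_assets_unallocated"', '"unallocated_assets"'),
--         ('"segment_liabilities_unallocated"', '"unallocated_liabilities"'),
--         ('"finance_cost"', '"finance_costs"'),
--         ('"value_of_sales_&_services"', '"value_of_sales_services"'),
--         ('"segment_results_ebitda_', '"segment_ebitda_'),
--     ]
--
--     def apply(text, mappings):
--         if not mappings:
--             return text
--         old_name, new_name = mappings[0]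
--         return apply(new_name.join(text.split(old_name)), mappings[1:])
--
--     return apply(response_text, field_mappings)
-- ===== Notes on version B (the rewrite author's own statement) =====
-- stated objective: alternative
-- what changed: Each standardization pass is realized as split-on-the-old-key followed by join-with-the-new-name, applied by structural recursion over the mapping list, instead of A's iterative loop of str.replace scans.
import Mathlib
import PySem

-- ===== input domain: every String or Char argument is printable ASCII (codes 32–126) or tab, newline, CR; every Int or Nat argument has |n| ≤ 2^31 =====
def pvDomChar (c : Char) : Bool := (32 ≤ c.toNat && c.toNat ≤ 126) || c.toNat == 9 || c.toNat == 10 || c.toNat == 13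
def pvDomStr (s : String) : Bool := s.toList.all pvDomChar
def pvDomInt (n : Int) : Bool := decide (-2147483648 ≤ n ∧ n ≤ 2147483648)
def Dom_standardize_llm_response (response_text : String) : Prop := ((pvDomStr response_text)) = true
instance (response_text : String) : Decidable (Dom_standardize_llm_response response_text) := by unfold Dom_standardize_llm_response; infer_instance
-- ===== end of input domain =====

-- B replaces each str.replace pass by split-on-the-old-key / join-with-the-new-name, by
-- structural recursion over the mapping list (alternative decomposition, same cost).

-- ===== PORT A =====
def standardize_llm_response (response_text : String) : String :=
  let field_mappings : List (String × String) :=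
    [("\"segment_assets_unallocated\"", "\"unallocated_assets\""),
     ("\"segment_liabilities_unallocated\"", "\"unallocated_liabilities\""),
     ("\"finance_cost\"", "\"finance_costs\""),
     ("\"value_of_sales_&_services\"", "\"value_of_sales_services\""),
     ("\"segment_results_ebitda_", "\"segment_ebitda_")]
  field_mappings.foldl
    (fun standardized_text p => PySem.Str.replace standardized_text p.1 p.2)
    response_text

-- ===== PORT B =====
-- Source B's inner recursive 'apply'; keys are nonempty literals, so text.split(old) never raises
-- (the '.getD []' branch is unreachable on the mappings used).
def pvApplyMaps : String → List (String × String) → String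
  | text, [] => text
  | text, (old_name, new_name) :: rest =>
      pvApplyMaps (PySem.Str.join new_name ((PySem.Str.split? text old_name).getD [])) rest

def standardize_llm_response_alt (response_text : String) : String :=
  pvApplyMaps response_text
    [("\"segment_assets_unallocated\"", "\"unallocated_assets\""),
     ("\"segment_liabilities_unallocated\"", "\"unallocated_liabilities\""),
     ("\"finance_cost\"", "\"finance_costs\""),
     ("\"value_of_sales_&_services\"", "\"value_of_sales_services\""),
     ("\"segment_results_ebitda_", "\"segment_ebitda_")]

-- ===== PRECONDITION & SPEC =====
def Spec_standardize_llm_response (response_text : String) (out : String) : Prop := out = standardize_llm_response_alt response_text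
instance (response_text : String) (out : String) : Decidable (Spec_standardize_llm_response response_text out) := by unfold Spec_standardize_llm_response; infer_instance

-- ===== CLAIM (what is proved, stated in full; the proofs are below) =====
def Claim_equal_standardize_llm_response : Prop := ∀ (response_text : String), Dom_standardize_llm_response response_text → Spec_standardize_llm_response response_text (standardize_llm_response response_text)

-- ===== LEMMAS AND PROOFS =====

-- Forward ("accumulator-free") form of PySem.Chars.splitOn.go.
def pvSP (sep : List Char) : Nat → List Char → List (List Char)
  | 0, l => [l]
  | _ + 1, [] => [[]]
  | fuel + 1, c :: t =>
      if sep.isPrefixOf (c :: t) then [] :: pvSP sep fuel (List.drop sep.length (c :: t))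
      else
        match pvSP sep fuel t with
        | [] => [[c]]
        | p :: ps => (c :: p) :: ps

-- Forward form of PySem.Chars.replace.go.
def pvRP (sep new : List Char) : Nat → List Char → List Char
  | 0, l => l
  | _ + 1, [] => []
  | fuel + 1, c :: t =>
      if sep.isPrefixOf (c :: t) then new ++ pvRP sep new fuel (List.drop sep.length (c :: t))
      else c :: pvRP sep new fuel t

def pvConsHead (pre : List Char) : List (List Char) → List (List Char)
  | [] => [pre]
  | p :: ps => (pre ++ p) :: ps

theorem pvSP_ne_nil (sep : List Char) (fuel : Nat) (l : List Char) : pvSP sep fuel l ≠ [] := by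
  induction fuel generalizing l with
  | zero => simp [pvSP]
  | succ n ih =>
    cases l with
    | nil => simp [pvSP]
    | cons c t =>
      unfold pvSP
      split
      · simp
      · cases h : pvSP sep n t <;> simp

theorem pvReplace_go_eq (sep new : List Char) (fuel : Nat) (l acc : List Char) :
    PySem.Chars.replace.go sep new fuel l acc = acc.reverse ++ pvRP sep new fuel l := by
  induction fuel generalizing l acc with
  | zero => simp [PySem.Chars.replace.go, pvRP]
  | succ n ih =>
    cases l with
    | nil => simp [PySem.Chars.replace.go, pvRP]
    | cons c t =>
      unfold PySem.Chars.replace.go pvRP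
      split
      · rw [ih]; simp
      · rw [ih]; simp

theorem pvSplitOn_go_eq (sep : List Char) (fuel : Nat) (l cur : List Char) (acc : List (List Char)) :
    PySem.Chars.splitOn.go sep fuel l cur acc = acc.reverse ++ pvConsHead cur.reverse (pvSP sep fuel l) := by
  induction fuel generalizing l cur acc with
  | zero => simp [PySem.Chars.splitOn.go, pvSP, pvConsHead]
  | succ n ih =>
    cases l with
    | nil => simp [PySem.Chars.splitOn.go, pvSP, pvConsHead]
    | cons c t =>
      unfold PySem.Chars.splitOn.go pvSP
      split
      · rw [ih]
        cases h : pvSP sep n (List.drop sep.length (c :: t)) with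
        | nil => exact absurd h (pvSP_ne_nil sep n _)
        | cons p ps => simp [pvConsHead]
      · rw [ih]
        cases h : pvSP sep n t with
        | nil => exact absurd h (pvSP_ne_nil sep n t)
        | cons p ps => simp [pvConsHead]

theorem pvRP_fuel_irrel (sep new : List Char) (hsep : sep ≠ []) :
    ∀ (f f' : Nat) (l : List Char), l.length ≤ f → l.length ≤ f' →
      pvRP sep new f l = pvRP sep new f' l := by
  intro f
  induction f with
  | zero =>
    intro f' l h _
    interval_cases hl : l.length
    · cases l with
      | nil => cases f' <;> simp [pvRP]
      | cons c t => simp at hl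
    
  | succ n ih =>
    intro f' l h h'
    cases l with
    | nil => cases f' <;> simp [pvRP]
    | cons c t =>
      cases f' with
      | zero => simp at h'
      | succ m =>
        unfold pvRP
        split
        · have hs1 : 0 < sep.length := List.length_pos_iff.mpr hsep
          simp only [List.length_cons] at h h'
          have hd : (List.drop sep.length (c :: t)).length ≤ n := by
            simp only [List.length_drop, List.length_cons]; omega
          have hd' : (List.drop sep.length (c :: t)).length ≤ m := by
            simp only [List.length_drop, List.length_cons]; omega
          rw [ih m _ hd hd']
        · simp only [List.length_cons] at h h'
          rw [ih m t (by omega) (by omega)]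

theorem pvJoin_consHead (new p : List Char) (c : Char) (ps : List (List Char)) :
    PySem.Chars.join new ((c :: p) :: ps) = c :: PySem.Chars.join new (p :: ps) := by
  cases ps with
  | nil => simp [PySem.Chars.join, List.intercalate]
  | cons q qs => simp [PySem.Chars.join, List.intercalate]

theorem pvJoin_nil_cons (new p : List Char) (ps : List (List Char)) :
    PySem.Chars.join new ([] :: p :: ps) = new ++ PySem.Chars.join new (p :: ps) := by
  simp [PySem.Chars.join, List.intercalate]

theorem pvJoin_SP_eq_RP (sep new : List Char) (hsep : sep ≠ []) :
    ∀ (fuel : Nat) (l : List Char), l.length ≤ fuel →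
      PySem.Chars.join new (pvSP sep fuel l) = pvRP sep new fuel l := by
  intro fuel
  induction fuel with
  | zero =>
    intro l h
    have : l = [] := by cases l with | nil => rfl | cons c t => simp at h
    subst this
    simp [pvSP, pvRP, PySem.Chars.join, List.intercalate]
  | succ n ih =>
    intro l h
    cases l with
    | nil => simp [pvSP, pvRP, PySem.Chars.join, List.intercalate]
    | cons c t =>
      unfold pvSP pvRP
      split
      · have hs1 : 0 < sep.length := List.length_pos_iff.mpr hsep
        simp only [List.length_cons] at h
        have hd : (List.drop sep.length (c :: t)).length ≤ n := by
          simp only [List.length_drop, List.length_cons]; omega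
        cases hsp : pvSP sep n (List.drop sep.length (c :: t)) with
        | nil => exact absurd hsp (pvSP_ne_nil sep n _)
        | cons p ps =>
          rw [pvJoin_nil_cons, ← hsp, ih _ hd]
      · simp only [List.length_cons] at h
        have ht : t.length ≤ n := by omega
        cases hsp : pvSP sep n t with
        | nil => exact absurd hsp (pvSP_ne_nil sep n t)
        | cons p ps =>
          rw [pvJoin_consHead, ← hsp, ih t ht]

-- one pass: new.join(s.split(old)) = s.replace(old, new), Chars level (old ≠ "")
theorem pvJoin_splitOn (s sep new : List Char) (hsep : sep ≠ []) :
    PySem.Chars.join new (PySem.Chars.splitOn s sep) = PySem.Chars.replace s sep new := by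
  have hrepl : PySem.Chars.replace s sep new = pvRP sep new s.length s := by
    unfold PySem.Chars.replace
    rw [if_neg (by simpa [List.isEmpty_iff] using hsep)]
    rw [pvReplace_go_eq]
    simp
  have hsplit : PySem.Chars.splitOn s sep = pvSP sep (s.length + 1) s := by
    unfold PySem.Chars.splitOn
    rw [pvSplitOn_go_eq]
    cases h : pvSP sep (s.length + 1) s with
    | nil => exact absurd h (pvSP_ne_nil sep _ s)
    | cons p ps => simp [pvConsHead]
  rw [hsplit, pvJoin_SP_eq_RP sep new hsep (s.length + 1) s (by omega), hrepl]
  exact pvRP_fuel_irrel sep new hsep (s.length + 1) s.length s (by omega) (by omega)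

-- one pass, Str level
theorem pvStep_eq (s old new : String) (hold : old.toList ≠ []) :
    PySem.Str.join new ((PySem.Str.split? s old).getD []) = PySem.Str.replace s old new := by
  unfold PySem.Str.split? PySem.Chars.split? PySem.Str.join PySem.Str.replace
  rw [if_neg (by simpa [List.isEmpty_iff] using hold)]
  simp only [Option.map_some, Option.getD_some, List.map_map]
  have : (PySem.Chars.splitOn s.toList old.toList).map (String.toList ∘ String.ofList)
      = PySem.Chars.splitOn s.toList old.toList := by
    simp [Function.comp_def, String.toList_ofList]
  rw [this, pvJoin_splitOn s.toList old.toList new.toList hold]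

theorem pvApplyMaps_eq_foldl (maps : List (String × String)) :
    ∀ (s : String), (∀ p ∈ maps, p.1.toList ≠ []) →
      pvApplyMaps s maps = maps.foldl (fun t p => PySem.Str.replace t p.1 p.2) s := by
  induction maps with
  | nil => intro s _; simp [pvApplyMaps]
  | cons hd tl ih =>
    intro s hne
    obtain ⟨old, new⟩ := hd
    simp only [pvApplyMaps, List.foldl_cons]
    rw [pvStep_eq s old new (hne (old, new) (by simp))]
    exact ih _ (fun p hp => hne p (by simp [hp]))

-- ===== VERDICT (by name: the statement is the Claim_ definition above) =====
theorem standardize_llm_response_spec : Claim_equal_standardize_llm_response := by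
  intro response_text _
  unfold Spec_standardize_llm_response standardize_llm_response standardize_llm_response_alt
  rw [pvApplyMaps_eq_foldl _ response_text (by decide)]
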